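-- pv_equiv track=rewrite | github.com/jeongye01/codingTestPython | 프로그래머스/Lv2/Day3/피로도.py | solution
-- ===== SOURCE A (Python) =====
-- from itertools import permutations
--
-- def solution(k, dungeons):
--     answer = 0
--     for perm in list(permutations(dungeons,len(dungeons))):
--         power=k
--         cnt=0
--         for p in perm:
--             if power>=p[0]:
--                 power-=p[1]
--                 cnt+=1
--             else:
--                 break
--         answer=max(cnt,answer)
--     return answer
-- ===== SOURCE B (Python) =====
-- def solution(k, dungeons):
--     # Depth-first search over the remaining dungeons: try each clearable
--     # dungeon as the next one and recurse on the rest.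
--     best = 0
--     for i, d in enumerate(dungeons):
--         if k >= d[0]:
--             best = max(best, 1 + solution(k - d[1], dungeons[:i] + dungeons[i + 1:]))
--     return best
-- ===== Notes on version B (the rewrite author's own statement) =====
-- stated objective: faster
-- what changed: A materialises the full list of all n! permutations and scans each from scratch; B is a recursive depth-first search that tries each still-remaining clearable dungeon as the next one, so infeasible prefixes are pruned and shared prefixes are not rescanned.
-- outside the precondition, e.g. on solution(0, [[5]]): A returns 0, B returns 0
import Mathlib
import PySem

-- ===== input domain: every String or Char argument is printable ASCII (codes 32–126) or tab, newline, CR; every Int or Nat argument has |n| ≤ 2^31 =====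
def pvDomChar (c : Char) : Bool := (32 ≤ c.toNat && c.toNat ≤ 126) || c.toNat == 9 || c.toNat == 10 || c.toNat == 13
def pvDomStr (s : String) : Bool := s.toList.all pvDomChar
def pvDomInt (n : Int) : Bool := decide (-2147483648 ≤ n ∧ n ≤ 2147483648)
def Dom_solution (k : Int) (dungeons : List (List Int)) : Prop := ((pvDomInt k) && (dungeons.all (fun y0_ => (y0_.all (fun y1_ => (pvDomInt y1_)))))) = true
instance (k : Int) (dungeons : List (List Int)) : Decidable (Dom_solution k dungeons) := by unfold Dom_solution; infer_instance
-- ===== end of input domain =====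

-- B replaces A's enumeration of all n! permutations by a recursive depth-first
-- search over the remaining dungeons (objective: faster on inputs with
-- infeasible prefixes; equal worst case).

-- d[0] / d[1]: exact on the Pre_ domain (every dungeon has length ≥ 2).
def reqOf (d : List Int) : Int := (PySem.List.pyGet? d 0).getD 0
def costOf (d : List Int) : Int := (PySem.List.pyGet? d 1).getD 0

-- ===== PORT A =====
-- inner loop of A: power=k; cnt=0; for p in perm: …
def runA (power : Int) (cnt : Int) (perm : List (List Int)) : Int :=
  match perm with
  | [] => cnt
  | p :: rest =>
    if reqOf p ≤ power then runA (power - costOf p) (cnt + 1) rest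
    else cnt

def solution (k : Int) (dungeons : List (List Int)) : Int :=
  dungeons.permutations.foldl (fun answer perm => max (runA k 0 perm) answer) 0

-- ===== PORT B =====
-- DFS: `pre ++ post` are the remaining dungeons, the loop index walks `post`,
-- `best` is the running maximum (mirrors Source B's enumerate loop).
mutual
def solution_alt (k : Int) (dungeons : List (List Int)) : Int :=
  altAux k [] dungeons 0
termination_by (dungeons.length, dungeons.length + 1)
decreasing_by
  have h : ([] : List (List Int)).length + dungeons.length = dungeons.length := by simp
  rw [h]
  exact Prod.Lex.right _ (by omega)

def altAux (k : Int) (pre post : List (List Int)) (best : Int) : Int :=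
  match post with
  | [] => best
  | d :: rest =>
    let best' :=
      if reqOf d ≤ k then
        max best (1 + solution_alt (k - costOf d) (pre ++ rest))
      else best
    altAux k (pre ++ [d]) rest best'
termination_by (pre.length + post.length, post.length)
decreasing_by
  · apply Prod.Lex.left; simp
  · have h : (pre ++ [d]).length + rest.length = pre.length + (rest.length + 1) := by
      simp; omega
    rw [h]
    exact Prod.Lex.right _ (by simp)
end

-- ===== PRECONDITION & SPEC =====
-- Pre_ requires every dungeon to be a (required, cost) pair with at least two
-- entries: on shorter inner lists A raises IndexError whenever its scan reaches
-- the short list with enough power (p[0] on an empty list, p[1] on a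
-- singleton), so such inputs are outside the problem's natural domain.
def Pre_solution (k : Int) (dungeons : List (List Int)) : Prop :=
  ∀ d ∈ dungeons, 2 ≤ d.length
instance (k : Int) (dungeons : List (List Int)) : Decidable (Pre_solution k dungeons) := by
  unfold Pre_solution; infer_instance

def pvWitness_solution : Int × List (List Int) := (80, [[80, 20], [50, 40], [30, 10]])

def Spec_solution (k : Int) (dungeons : List (List Int)) (out : Int) : Prop := out = solution_alt k dungeons
instance (k : Int) (dungeons : List (List Int)) (out : Int) : Decidable (Spec_solution k dungeons out) := by unfold Spec_solution; infer_instance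

-- ===== CLAIM (what is proved, stated in full; the proofs are below) =====
def Claim_equal_solution : Prop := ∀ (k : Int) (dungeons : List (List Int)), Dom_solution k dungeons → Pre_solution k dungeons → Spec_solution k dungeons (solution k dungeons)

-- ===== LEMMAS AND PROOFS =====

theorem altAux_nonneg : ∀ (post pre : List (List Int)) (k b : Int),
    0 ≤ b → 0 ≤ altAux k pre post b := by
  intro post
  induction post with
  | nil => intro pre k b hb; simpa [altAux] using hb
  | cons d rest ih =>
    intro pre k b hb
    simp only [altAux]
    apply ih
    split <;> omega

theorem altAux_ge_base : ∀ (post pre : List (List Int)) (k b : Int),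
    b ≤ altAux k pre post b := by
  intro post
  induction post with
  | nil => intro pre k b; simp [altAux]
  | cons d rest ih =>
    intro pre k b
    rw [altAux]
    refine le_trans ?_ (ih (pre ++ [d]) k _)
    split
    · exact le_max_left _ _
    · exact le_rfl

theorem alt_nonneg (k : Int) (l : List (List Int)) : 0 ≤ solution_alt k l := by
  simp only [solution_alt]; exact altAux_nonneg l [] k 0 le_rfl

theorem altAux_ge_choice :
    ∀ (mid : List (List Int)) (pre post : List (List Int)) (d : List Int) (k b : Int),
      reqOf d ≤ k →
      1 + solution_alt (k - costOf d) (pre ++ (mid ++ post)) ≤ altAux k pre (mid ++ d :: post) b := by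
  intro mid
  induction mid with
  | nil =>
    intro pre post d k b hfeas
    simp only [List.nil_append, altAux]
    simp only [hfeas, if_pos]
    calc 1 + solution_alt (k - costOf d) (pre ++ ([] ++ post))
        = 1 + solution_alt (k - costOf d) (pre ++ post) := by simp
      _ ≤ max b (1 + solution_alt (k - costOf d) (pre ++ post)) := le_max_right _ _
      _ ≤ _ := altAux_ge_base _ _ _ _
  | cons x mid' ih =>
    intro pre post d k b hfeas
    simp only [List.cons_append, altAux]
    have h := ih (pre ++ [x]) post d k
      (if reqOf x ≤ k then max b (1 + solution_alt (k - costOf x) (pre ++ (mid' ++ d :: post))) else b)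
      hfeas
    have heq : (pre ++ [x]) ++ (mid' ++ post) = pre ++ ((x :: mid') ++ post) := by simp
    rw [heq] at h
    exact h

theorem altAux_attained :
    ∀ (post pre : List (List Int)) (k b : Int),
      altAux k pre post b = b ∨
      ∃ (mid : List (List Int)) (d : List Int) (post' : List (List Int)),
        post = mid ++ d :: post' ∧ reqOf d ≤ k ∧
        altAux k pre post b = 1 + solution_alt (k - costOf d) (pre ++ (mid ++ post')) := by
  intro post
  induction post with
  | nil => intro pre k b; left; simp [altAux]
  | cons x rest ih =>
    intro pre k b
    simp only [altAux]
    by_cases hfeas : reqOf x ≤ k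
    · simp only [hfeas, if_pos]
      rcases ih (pre ++ [x]) k (max b (1 + solution_alt (k - costOf x) (pre ++ rest))) with h | ⟨mid, d, post', hsplit, hf, hval⟩
      · rcases max_choice b (1 + solution_alt (k - costOf x) (pre ++ rest)) with hm | hm
        · left; rw [h, hm]
        · right
          exact ⟨[], x, rest, by simp, hfeas, by rw [h, hm]; simp⟩
      · right
        refine ⟨x :: mid, d, post', by simp [hsplit], hf, ?_⟩
        rw [hval]; simp
    · simp only [hfeas, if_neg, not_false_iff]
      rcases ih (pre ++ [x]) k b with h | ⟨mid, d, post', hsplit, hf, hval⟩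
      · left; exact h
      · right
        refine ⟨x :: mid, d, post', by simp [hsplit], hf, ?_⟩
        rw [hval]; simp
    
theorem runA_acc : ∀ (σ : List (List Int)) (k c : Int), runA k c σ = c + runA k 0 σ := by
  intro σ
  induction σ with
  | nil => intro k c; simp [runA]
  | cons p rest ih =>
    intro k c
    by_cases h : reqOf p ≤ k
    · simp only [runA, h, if_pos]
      rw [ih _ (c + 1), ih _ (0 + 1)]; ring
    · simp [runA, h]

theorem runA_nonneg : ∀ (σ : List (List Int)) (k : Int), 0 ≤ runA k 0 σ := by
  intro σ
  induction σ with
  | nil => intro k; simp [runA]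
  | cons p rest ih =>
    intro k
    by_cases h : reqOf p ≤ k
    · simp only [runA, h, if_pos]
      rw [runA_acc]
      have := ih (k - costOf p); omega
    · simp [runA, h]

theorem fold_ge_init : ∀ (xs : List (List (List Int))) (a k : Int),
    a ≤ xs.foldl (fun ans σ => max (runA k 0 σ) ans) a := by
  intro xs
  induction xs with
  | nil => intro a k; simp
  | cons x rest ih =>
    intro a k
    simp only [List.foldl]
    have := ih (max (runA k 0 x) a) k
    omega

theorem fold_ge_mem : ∀ (xs : List (List (List Int))) (a k : Int) (σ : List (List Int)),
    σ ∈ xs → runA k 0 σ ≤ xs.foldl (fun ans σ => max (runA k 0 σ) ans) a := by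
  intro xs
  induction xs with
  | nil => intro a k σ h; simp at h
  | cons x rest ih =>
    intro a k σ h
    simp only [List.foldl]
    rcases List.mem_cons.mp h with rfl | hmem
    · have := fold_ge_init rest (max (runA k 0 σ) a) k
      omega
    · exact ih _ k σ hmem

theorem fold_attained : ∀ (xs : List (List (List Int))) (a k : Int),
    xs.foldl (fun ans σ => max (runA k 0 σ) ans) a = a ∨
    ∃ σ ∈ xs, xs.foldl (fun ans σ => max (runA k 0 σ) ans) a = runA k 0 σ := by
  intro xs
  induction xs with
  | nil => intro a k; left; simp
  | cons x rest ih =>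
    intro a k
    simp only [List.foldl]
    rcases ih (max (runA k 0 x) a) k with h | ⟨σ, hmem, hval⟩
    · rcases max_choice (runA k 0 x) a with hm | hm
      · right; exact ⟨x, List.mem_cons_self, by rw [h, hm]⟩
      · left; rw [h, hm]
    · right; exact ⟨σ, List.mem_cons_of_mem _ hmem, hval⟩

theorem run_le_alt : ∀ (n : Nat) (σ l : List (List Int)) (k : Int),
    σ.length ≤ n → σ.Perm l → runA k 0 σ ≤ solution_alt k l := by
  intro n
  induction n with
  | zero =>
    intro σ l k hlen hperm
    have : σ = [] := List.length_eq_zero_iff.mp (Nat.le_zero.mp hlen)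
    subst this
    simp only [runA]
    exact alt_nonneg k l
  | succ n ih =>
    intro σ l k hlen hperm
    match σ with
    | [] => simp only [runA]; exact alt_nonneg k l
    | d :: σ' =>
      by_cases hfeas : reqOf d ≤ k
      · have hd : d ∈ l := hperm.mem_iff.mp List.mem_cons_self
        obtain ⟨s, t, rfl⟩ := List.append_of_mem hd
        have hperm' : σ'.Perm (s ++ t) :=
          (hperm.trans List.perm_middle).cons_inv
        have hlen' : σ'.length ≤ n := by simp at hlen; omega
        have h1 : runA (k - costOf d) 0 σ' ≤ solution_alt (k - costOf d) (s ++ t) :=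
          ih σ' (s ++ t) (k - costOf d) hlen' hperm'
        have h2 : 1 + solution_alt (k - costOf d) ([] ++ (s ++ t)) ≤ altAux k [] (s ++ d :: t) 0 :=
          altAux_ge_choice s [] t d k 0 hfeas
        rw [List.nil_append] at h2
        simp only [solution_alt]
        simp only [runA, hfeas, if_pos]
        rw [runA_acc]
        omega
      · simp only [runA, hfeas, if_neg, not_false_iff]
        exact alt_nonneg k _

theorem alt_le_fold : ∀ (n : Nat) (l : List (List Int)) (k : Int),
    l.length ≤ n → solution_alt k l ≤ solution k l := by
  intro n
  induction n with
  | zero =>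
    intro l k hlen
    have : l = [] := List.length_eq_zero_iff.mp (Nat.le_zero.mp hlen)
    subst this
    simp only [solution_alt]
    simp [altAux, solution]
  | succ n ih =>
    intro l k hlen
    simp only [solution_alt]
    rcases altAux_attained l [] k 0 with h | ⟨mid, d, post', hsplit, hfeas, hval⟩
    · rw [h]
      exact le_trans (by omega) (fold_ge_init l.permutations 0 k)
    · rw [hval, List.nil_append]
      set rem := mid ++ post' with hrem
      have hlenrem : rem.length ≤ n := by
        subst hsplit; simp [hrem] at hlen ⊢; omega
      have hIH : solution_alt (k - costOf d) rem ≤ solution (k - costOf d) rem :=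
        ih rem (k - costOf d) hlenrem
      -- pick a permutation σ' of rem whose run is ≥ solution_alt (k-cost) rem
      have hpick : ∃ σ' : List (List Int), σ'.Perm rem ∧
          solution_alt (k - costOf d) rem ≤ runA (k - costOf d) 0 σ' := by
        rcases fold_attained rem.permutations 0 (k - costOf d) with h0 | ⟨σ', hmem, hv⟩
        · refine ⟨rem, List.Perm.refl rem, ?_⟩
          have h1 : solution_alt (k - costOf d) rem ≤ 0 := by
            unfold solution at hIH; omega
          have h2 := runA_nonneg rem (k - costOf d)
          omega
        · refine ⟨σ', List.perm_of_mem_permutations hmem, ?_⟩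
          unfold solution at hIH; omega
      obtain ⟨σ', hperm', hrun⟩ := hpick
      have hpermfull : (d :: σ').Perm l := by
        rw [hsplit]
        exact (hperm'.cons d).trans List.perm_middle.symm
      have hmem : (d :: σ') ∈ l.permutations := List.mem_permutations.mpr hpermfull
      have hbound := fold_ge_mem l.permutations 0 k (d :: σ') hmem
      have hrunfull : runA k 0 (d :: σ') = 1 + runA (k - costOf d) 0 σ' := by
        simp only [runA, hfeas, if_pos]
        rw [runA_acc]; omega
      unfold solution
      omega

theorem alt_eq_fold (k : Int) (l : List (List Int)) : solution k l = solution_alt k l := by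
  apply le_antisymm
  · unfold solution
    rcases fold_attained l.permutations 0 k with h | ⟨σ, hmem, hval⟩
    · rw [h]; exact alt_nonneg k l
    · rw [hval]
      exact run_le_alt σ.length σ l k le_rfl (List.perm_of_mem_permutations hmem)
  · exact alt_le_fold l.length l k le_rfl

-- ===== VERDICT (by name: the statement is the Claim_ definition above) =====
theorem solution_spec : Claim_equal_solution := by
  intro k dungeons _ _
  unfold Spec_solution
  exact alt_eq_fold k dungeons
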